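-- pv_equiv track=rewrite | github.com/stupidguy176/algorithms-demo-code | test/scc_kosaraju.py | iterative_dfs_order
-- ===== SOURCE A (Python) =====
-- def iterative_dfs_order(Grev, N):
--     """
--     First pass: on reversed graph.
--     Returns finishing order list.
--     """
--     visited = [False] * (N + 1)
--     order = []
--
--     for s in range(N, 0, -1):
--         if visited[s]:
--             continue
--         if not Grev[s]:
--             # Still need to mark isolated vertices
--             visited[s] = True
--             order.append(s)
--             continue
--
--         # Simulate recursion for DFS(s) to compute finishing times
--         stack = [(s, 0)]  # (node, next_child_idx)
--         visited[s] = True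
--         while stack:
--             node, i = stack[-1]
--             if i < len(Grev[node]):
--                 nxt = Grev[node][i]
--                 stack[-1] = (node, i + 1)
--                 if not visited[nxt]:
--                     visited[nxt] = True
--                     stack.append((nxt, 0))
--             else:
--                 # all children processed => finished
--                 order.append(node)
--                 stack.pop()
--     return order
-- ===== SOURCE B (Python) =====
-- def iterative_dfs_order(Grev, N):
--     """
--     First pass: on reversed graph.
--     Returns finishing order list.
--     """
--     visited = [False] * (N + 1)
--     order = []
--
--     for s in range(N, 0, -1):
--         # Explicit expand/finish stack: an entry (node, True) asks to expand
--         # node (skipped if already visited), (node, False) records it finished.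
--         stack = [(s, True)]
--         while stack:
--             node, expand = stack.pop()
--             if expand:
--                 if visited[node]:
--                     continue
--                 visited[node] = True
--                 stack.append((node, False))
--                 for nxt in reversed(Grev[node]):
--                     stack.append((nxt, True))
--             else:
--                 order.append(node)
--     return order
-- ===== Notes on version B (the rewrite author's own statement) =====
-- stated objective: alternative
-- what changed: Replaces A's in-place-mutated (node, next_child_index) frame stack (and its special case for childless start vertices) by a uniform expand/finish marker stack: each popped (node, True) is visited-checked, marked, and expanded into its reversed child list above a (node, False) finish marker that emits the node.
-- outside the precondition, e.g. on iterative_dfs_order({}, 1): A raises KeyError, B raises KeyError; on iterative_dfs_order({1: [-3]}, 1): A raises IndexError, B raises IndexError; on iterative_dfs_order({1: [-1]}, 1): A returns [1], B returns [1]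
import Mathlib
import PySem

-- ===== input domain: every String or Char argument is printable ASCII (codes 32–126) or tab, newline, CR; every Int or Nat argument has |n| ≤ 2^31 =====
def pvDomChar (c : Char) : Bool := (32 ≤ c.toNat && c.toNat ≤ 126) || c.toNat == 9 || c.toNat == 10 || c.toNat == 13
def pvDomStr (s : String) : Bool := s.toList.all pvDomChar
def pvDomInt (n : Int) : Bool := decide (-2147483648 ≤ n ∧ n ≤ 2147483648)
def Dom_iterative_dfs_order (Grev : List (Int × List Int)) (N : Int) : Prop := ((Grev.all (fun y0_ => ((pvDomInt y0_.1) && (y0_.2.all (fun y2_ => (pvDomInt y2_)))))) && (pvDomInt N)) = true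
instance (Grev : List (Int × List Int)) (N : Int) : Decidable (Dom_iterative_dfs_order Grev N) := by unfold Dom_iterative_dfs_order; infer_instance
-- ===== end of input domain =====

-- B replaces A's in-place-mutated (node, next_child_index) frame stack (plus its special case for
-- childless start vertices) by a uniform expand/finish marker stack; same algorithmic cost (alternative).


-- ===== PORT A =====
-- Grev[n]: dict lookup; total via default [] — exact under Pre_ (key present wherever looked up).
def pvChildren (Grev : List (Int × List Int)) (n : Int) : List Int :=
  PySem.Dict.getD (PySem.Dict.ofList Grev) n []

-- count of unvisited cells (termination measure only)
def pvCntF (v : List Bool) : Nat := v.countP (fun b => !b)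

-- marking a currently-false in-range cell strictly decreases pvCntF (cited by both decreasing_by)
lemma pvCntF_pySetD_lt (v : List Bool) (n : Int) (h0 : 0 ≤ n) (h1 : n < (v.length : Int))
    (hv : PySem.List.pyGetD v n false = false) :
    pvCntF (PySem.List.pySetD v n true) < pvCntF v := by
  have hk : n.toNat < v.length := by omega
  have hg : v[n.toNat] = false := by
    rw [PySem.List.pyGetD_eq_getElem v false h0 h1] at hv; exact hv
  have hpos : 0 < v.countP (fun b => !b) :=
    List.countP_pos_iff.mpr ⟨false, by rw [← hg]; exact List.getElem_mem hk, by simp⟩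
  simp only [pvCntF, PySem.List.pySetD_of_nonneg v true h0, List.countP_set hk, hg,
    Bool.not_false, Bool.not_true, if_true]
  have hz : (if false = true then (1 : Nat) else 0) = 0 := rfl
  rw [hz]
  omega

-- remaining-children sum of A's stack (termination measure only)
def pvRemA (Grev : List (Int × List Int)) (stack : List (Int × Nat)) : Nat :=
  (stack.map (fun f => (pvChildren Grev f.1).length - f.2)).sum

-- A's inner while loop over (node, next_child_idx) frames; the range test on nxt is a
-- total-making guard at exactly the point Python indexes visited[nxt] (exact under Pre_).
def pvLoopA (Grev : List (Int × List Int)) (visited : List Bool) (order : List Int)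
    (stack : List (Int × Nat)) : List Bool × List Int :=
  match stack with
  | [] => (visited, order)
  | (node, i) :: rest =>
    let ch := pvChildren Grev node
    if h : i < ch.length then
      let nxt := ch[i]
      if hr : 0 ≤ nxt ∧ nxt < (visited.length : Int) then
        if PySem.List.pyGetD visited nxt false then
          pvLoopA Grev visited order ((node, i + 1) :: rest)
        else
          pvLoopA Grev (PySem.List.pySetD visited nxt true) order ((nxt, 0) :: (node, i + 1) :: rest)
      else (visited, order)
    else
      pvLoopA Grev visited (order ++ [node]) rest
termination_by (pvCntF visited, pvRemA Grev stack + stack.length)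
decreasing_by
  · apply Prod.Lex.right
    have h' : i < (pvChildren Grev node).length := h
    simp only [pvRemA, List.map_cons, List.sum_cons, List.length_cons]
    omega
  · apply Prod.Lex.left
    rename_i hf
    exact pvCntF_pySetD_lt _ _ hr.1 hr.2 (by simpa using hf)
  · apply Prod.Lex.right
    simp only [pvRemA, List.map_cons, List.sum_cons, List.length_cons]
    omega

def iterative_dfs_order (Grev : List (Int × List Int)) (N : Int) : List Int :=
  ((PySem.List.pyRange N 0 (-1)).foldl (fun st s =>
    if PySem.List.pyGetD st.1 s false then st
    else if pvChildren Grev s = [] then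
      (PySem.List.pySetD st.1 s true, st.2 ++ [s])
    else
      pvLoopA Grev (PySem.List.pySetD st.1 s true) st.2 [(s, 0)])
    (List.replicate (N + 1).toNat false, [])).2

-- ===== PORT B =====
-- B's inner while loop; Python's end-of-list stack is held top-at-head, so pop = head and
-- pushing (node, False) then reversed(Grev[node]) prepends the children in index order.
-- The range test on node is the same total-making guard at Python's visited[node] (exact under Pre_).
def pvLoopB (Grev : List (Int × List Int)) (visited : List Bool) (order : List Int)
    (stack : List (Int × Bool)) : List Bool × List Int :=
  match stack with
  | [] => (visited, order)
  | (node, expand) :: rest =>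
    if expand then
      if hr : 0 ≤ node ∧ node < (visited.length : Int) then
        if PySem.List.pyGetD visited node false then
          pvLoopB Grev visited order rest
        else
          pvLoopB Grev (PySem.List.pySetD visited node true) order
            ((pvChildren Grev node).map (fun c => (c, true)) ++ (node, false) :: rest)
      else (visited, order)
    else
      pvLoopB Grev visited (order ++ [node]) rest
termination_by (pvCntF visited, stack.length)
decreasing_by
  · apply Prod.Lex.right
    simp
  · apply Prod.Lex.left
    rename_i hf
    exact pvCntF_pySetD_lt _ _ hr.1 hr.2 (by simpa using hf)
  · apply Prod.Lex.right
    simp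

def iterative_dfs_order_alt (Grev : List (Int × List Int)) (N : Int) : List Int :=
  ((PySem.List.pyRange N 0 (-1)).foldl (fun st s =>
    pvLoopB Grev st.1 st.2 [(s, true)]) (List.replicate (N + 1).toNat false, [])).2

-- ===== PRECONDITION & SPEC =====
-- Pre_ is conservative on purpose: it asks every key 1..N to be present and every neighbour listed
-- under a key in 1..N to lie in 1..N; Python also happens to return when a missing key is never
-- reached or a negative neighbour wraps around in visited — those artefact corners are excluded,
-- since outside these bounds Grev[k] can raise KeyError and visited[nxt] can raise IndexError.
-- the first conjunct N ≤ |Grev| is implied by the second (N distinct keys need N pairs);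
-- it only short-circuits evaluation so the range is never materialised for huge N
def Pre_iterative_dfs_order (Grev : List (Int × List Int)) (N : Int) : Prop :=
  (decide (N ≤ (Grev.length : Int))
    && (PySem.List.pyRange N 0 (-1)).all (fun s => Grev.any (fun kv => kv.1 == s))
    && Grev.all (fun kv => !(1 ≤ kv.1 && kv.1 ≤ N) || kv.2.all (fun v => 1 ≤ v && v ≤ N))) = true
instance (Grev : List (Int × List Int)) (N : Int) : Decidable (Pre_iterative_dfs_order Grev N) := by
  unfold Pre_iterative_dfs_order; infer_instance

def pvWitness_iterative_dfs_order : (List (Int × List Int)) × Int := ([(2, [1]), (1, [2])], 2)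

def Spec_iterative_dfs_order (Grev : List (Int × List Int)) (N : Int) (out : List Int) : Prop := out = iterative_dfs_order_alt Grev N
instance (Grev : List (Int × List Int)) (N : Int) (out : List Int) : Decidable (Spec_iterative_dfs_order Grev N out) := by unfold Spec_iterative_dfs_order; infer_instance

-- ===== CLAIM (what is proved, stated in full; the proofs are below) =====
def Claim_equal_iterative_dfs_order : Prop := ∀ (Grev : List (Int × List Int)) (N : Int), Dom_iterative_dfs_order Grev N → Pre_iterative_dfs_order Grev N → Spec_iterative_dfs_order Grev N (iterative_dfs_order Grev N)

-- ===== LEMMAS AND PROOFS =====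

-- B's stack image of one A frame: the still-unscanned children as expand entries, then the finish marker.
def pvEnc (Grev : List (Int × List Int)) (f : Int × Nat) : List (Int × Bool) :=
  ((pvChildren Grev f.1).drop f.2).map (fun c => (c, true)) ++ [(f.1, false)]

lemma pvUpdate_items_sub {κ ν : Type} [BEq κ] [LawfulBEq κ] :
    ∀ (l : List (κ × ν)) (d : PySem.Dict κ ν) (p : κ × ν),
      p ∈ (d.update l).items → p ∈ d.items ∨ p ∈ l := by
  intro l
  induction l with
  | nil => intro d p hp; exact Or.inl (by simpa [PySem.Dict.update] using hp)
  | cons kv rest ih =>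
    intro d p hp
    have hp' : p ∈ ((d.insert kv.1 kv.2).update rest).items := by
      simpa [PySem.Dict.update] using hp
    rcases ih _ p hp' with hin | hin
    · rcases (PySem.Dict.mem_items_insert d kv.1 kv.2 p).mp hin with he | hm
      · exact Or.inr (by simp [he])
      · exact Or.inl hm.1
    · exact Or.inr (List.mem_cons_of_mem _ hin)

lemma pvChildren_mem (Grev : List (Int × List Int)) {n v : Int}
    (hv : v ∈ pvChildren Grev n) : ∃ kv ∈ Grev, kv.1 = n ∧ v ∈ kv.2 := by
  unfold pvChildren at hv
  rw [PySem.Dict.getD_eq_get?_getD] at hv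
  cases hg : (PySem.Dict.ofList Grev).get? n with
  | none => rw [hg] at hv; simp at hv
  | some adj =>
    rw [hg] at hv
    simp only [Option.getD_some] at hv
    have hmem := PySem.Dict.mem_items_of_get?_eq_some _ hg
    rcases pvUpdate_items_sub Grev PySem.Dict.empty (n, adj) hmem with h0 | h0
    · simp [PySem.Dict.empty] at h0
    · exact ⟨(n, adj), h0, rfl, hv⟩

lemma pvLoopA_length (Grev : List (Int × List Int)) (visited : List Bool) (order : List Int)
    (stack : List (Int × Nat)) : (pvLoopA Grev visited order stack).1.length = visited.length := by
  induction visited, order, stack using pvLoopA.induct (Grev := Grev) with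
  | case1 visited order => rw [pvLoopA.eq_def]
  | case2 visited order node i rest ch h nxt hr hvis ih =>
    rw [pvLoopA.eq_def]
    dsimp only
    rw [dif_pos h, dif_pos hr, if_pos hvis]
    exact ih
  | case3 visited order node i rest ch h nxt hr hvis ih =>
    rw [pvLoopA.eq_def]
    dsimp only
    rw [dif_pos h, dif_pos hr, if_neg hvis]
    rw [ih, PySem.List.length_pySetD]
  | case4 visited order node i rest ch h nxt hr =>
    rw [pvLoopA.eq_def]
    dsimp only
    rw [dif_pos h, dif_neg hr]
  | case5 visited order node i rest ch h ih =>
    rw [pvLoopA.eq_def]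
    dsimp only
    rw [dif_neg h]
    exact ih

-- one-step unfolding equations for B's loop
lemma pvLoopB_nil (Grev : List (Int × List Int)) (visited : List Bool) (order : List Int) :
    pvLoopB Grev visited order [] = (visited, order) := by
  rw [pvLoopB.eq_def]

lemma pvLoopB_skip (Grev : List (Int × List Int)) (visited : List Bool) (order : List Int)
    (node : Int) (rest : List (Int × Bool)) (hr : 0 ≤ node ∧ node < (visited.length : Int))
    (hvis : PySem.List.pyGetD visited node false = true) :
    pvLoopB Grev visited order ((node, true) :: rest) = pvLoopB Grev visited order rest := by
  rw [pvLoopB.eq_def]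
  dsimp only
  rw [if_pos rfl, dif_pos hr, if_pos hvis]

lemma pvLoopB_mark (Grev : List (Int × List Int)) (visited : List Bool) (order : List Int)
    (node : Int) (rest : List (Int × Bool)) (hr : 0 ≤ node ∧ node < (visited.length : Int))
    (hvis : ¬ PySem.List.pyGetD visited node false = true) :
    pvLoopB Grev visited order ((node, true) :: rest)
      = pvLoopB Grev (PySem.List.pySetD visited node true) order
          ((pvChildren Grev node).map (fun c => (c, true)) ++ (node, false) :: rest) := by
  rw [pvLoopB.eq_def]
  dsimp only
  rw [if_pos rfl, dif_pos hr, if_neg hvis]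

lemma pvLoopB_fin (Grev : List (Int × List Int)) (visited : List Bool) (order : List Int)
    (node : Int) (rest : List (Int × Bool)) :
    pvLoopB Grev visited order ((node, false) :: rest)
      = pvLoopB Grev visited (order ++ [node]) rest := by
  rw [pvLoopB.eq_def]
  dsimp only
  rw [if_neg (by decide : ¬ (false = true))]

-- shape of the encoded stack
lemma pvEnc_cons_of_lt (Grev : List (Int × List Int)) (node : Int) (i : Nat)
    (rest : List (Int × Nat)) (h : i < (pvChildren Grev node).length) :
    ((node, i) :: rest).flatMap (pvEnc Grev)
      = ((pvChildren Grev node)[i], true) :: (((node, i + 1) :: rest).flatMap (pvEnc Grev)) := by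
  simp only [List.flatMap_cons, pvEnc]
  rw [← List.getElem_cons_drop h]
  simp only [List.map_cons, List.cons_append, List.append_assoc]

lemma pvEnc_cons_of_ge (Grev : List (Int × List Int)) (node : Int) (i : Nat)
    (rest : List (Int × Nat)) (h : ¬ i < (pvChildren Grev node).length) :
    ((node, i) :: rest).flatMap (pvEnc Grev)
      = (node, false) :: rest.flatMap (pvEnc Grev) := by
  simp [pvEnc, List.drop_eq_nil_of_le (by omega : (pvChildren Grev node).length ≤ i)]

-- the simulation: B's loop on the encoded stack computes exactly A's loop
lemma pvSim (Grev : List (Int × List Int)) (N : Int)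
    (HC : ∀ n : Int, 1 ≤ n → n ≤ N → ∀ v ∈ pvChildren Grev n, 1 ≤ v ∧ v ≤ N) :
    ∀ (visited : List Bool) (order : List Int) (stA : List (Int × Nat)),
    (visited.length : Int) = N + 1 →
    (∀ f ∈ stA, 1 ≤ f.1 ∧ f.1 ≤ N) →
    pvLoopB Grev visited order (stA.flatMap (pvEnc Grev)) = pvLoopA Grev visited order stA := by
  intro visited order stA
  induction visited, order, stA using pvLoopA.induct (Grev := Grev) with
  | case1 visited order =>
    intro _ _
    rw [List.flatMap_nil, pvLoopB_nil, pvLoopA.eq_def]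
  | case2 visited order node i rest ch h nxt hr hvis ih =>
    intro hL hst
    rw [pvEnc_cons_of_lt Grev node i rest h, pvLoopB_skip Grev visited order _ _ hr hvis]
    rw [pvLoopA.eq_def]
    dsimp only
    rw [dif_pos h, dif_pos hr, if_pos hvis]
    exact ih hL (by
      intro f hf
      rcases List.mem_cons.mp hf with hfe | hfm
      · subst hfe; exact hst (node, i) List.mem_cons_self
      · exact hst f (List.mem_cons_of_mem _ hfm))
  | case3 visited order node i rest ch h nxt hr hvis ih =>
    intro hL hst
    have hnode := hst (node, i) List.mem_cons_self
    have hnxt : 1 ≤ nxt ∧ nxt ≤ N :=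
      HC node hnode.1 hnode.2 _ (List.getElem_mem h)
    rw [pvEnc_cons_of_lt Grev node i rest h, pvLoopB_mark Grev visited order _ _ hr hvis]
    rw [pvLoopA.eq_def]
    dsimp only
    rw [dif_pos h, dif_pos hr, if_neg hvis]
    have hstk : (pvChildren Grev nxt).map (fun c => (c, true))
        ++ (nxt, false) :: (((node, i + 1) :: rest).flatMap (pvEnc Grev))
        = ((nxt, 0) :: (node, i + 1) :: rest).flatMap (pvEnc Grev) := by
      simp [pvEnc]
    rw [hstk]
    refine ih ?_ ?_
    · rw [PySem.List.length_pySetD]; exact hL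
    · intro f hf
      rcases List.mem_cons.mp hf with hfe | hfm
      · subst hfe; exact hnxt
      · rcases List.mem_cons.mp hfm with hfe2 | hfm2
        · subst hfe2; exact hnode
        · exact hst f (List.mem_cons_of_mem _ hfm2)
  | case4 visited order node i rest ch h nxt hr =>
    intro hL hst
    have hnode := hst (node, i) List.mem_cons_self
    have hnxt : 1 ≤ nxt ∧ nxt ≤ N :=
      HC node hnode.1 hnode.2 _ (List.getElem_mem h)
    exact absurd ⟨by omega, by omega⟩ hr
  | case5 visited order node i rest ch h ih =>
    intro hL hst
    rw [pvEnc_cons_of_ge Grev node i rest h, pvLoopB_fin]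
    rw [pvLoopA.eq_def]
    dsimp only
    rw [dif_neg h]
    exact ih hL (fun f hf => hst f (List.mem_cons_of_mem _ hf))

lemma pvFold (Grev : List (Int × List Int)) (N : Int)
    (HC : ∀ n : Int, 1 ≤ n → n ≤ N → ∀ v ∈ pvChildren Grev n, 1 ≤ v ∧ v ≤ N)
    (l : List Int) (hl : ∀ s ∈ l, 1 ≤ s ∧ s ≤ N) :
    ∀ (st : List Bool × List Int), ((st.1.length : Int) = N + 1) →
    l.foldl (fun st s => pvLoopB Grev st.1 st.2 [(s, true)]) st
      = l.foldl (fun st s =>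
          if PySem.List.pyGetD st.1 s false then st
          else if pvChildren Grev s = [] then
            (PySem.List.pySetD st.1 s true, st.2 ++ [s])
          else
            pvLoopA Grev (PySem.List.pySetD st.1 s true) st.2 [(s, 0)]) st := by
  induction l with
  | nil => intro _ _; rfl
  | cons s l ih =>
    intro st hL
    have hs := hl s List.mem_cons_self
    have hl' : ∀ x ∈ l, 1 ≤ x ∧ x ≤ N := fun x hx => hl x (List.mem_cons_of_mem _ hx)
    have hr : 0 ≤ s ∧ s < (st.1.length : Int) := by omega
    rw [List.foldl_cons, List.foldl_cons]
    by_cases hvis : PySem.List.pyGetD st.1 s false = true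
    · rw [pvLoopB_skip Grev st.1 st.2 s [] hr hvis, pvLoopB_nil, if_pos hvis]
      exact ih hl' st hL
    · have hmk := pvLoopB_mark Grev st.1 st.2 s [] hr hvis
      have hstk : (pvChildren Grev s).map (fun c => (c, true)) ++ [(s, false)]
          = [((s : Int), (0 : Nat))].flatMap (pvEnc Grev) := by
        simp [pvEnc]
      rw [hmk, hstk, pvSim Grev N HC _ _ _ (by rw [PySem.List.length_pySetD]; exact hL)
        (by intro f hf; rcases List.mem_cons.mp hf with hfe | hfm
            · subst hfe; exact hs
            · simp at hfm)]
      rw [if_neg hvis]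
      by_cases hch : pvChildren Grev s = []
      · rw [if_pos hch]
        have : pvLoopA Grev (PySem.List.pySetD st.1 s true) st.2 [(s, 0)]
            = (PySem.List.pySetD st.1 s true, st.2 ++ [s]) := by
          rw [pvLoopA.eq_def]
          dsimp only
          rw [dif_neg (by simp [hch])]
          rw [pvLoopA.eq_def]
        rw [this]
        exact ih hl' _ (by simpa [PySem.List.length_pySetD] using hL)
      · rw [if_neg hch]
        exact ih hl' _ (by
          rw [pvLoopA_length, PySem.List.length_pySetD]; exact hL)

-- ===== VERDICT (by name: the statement is the Claim_ definition above) =====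
theorem iterative_dfs_order_spec : Claim_equal_iterative_dfs_order := by
  intro Grev N _ hPre
  unfold Spec_iterative_dfs_order iterative_dfs_order iterative_dfs_order_alt
  unfold Pre_iterative_dfs_order at hPre
  simp only [Bool.and_eq_true, List.all_eq_true] at hPre
  have hPreG := hPre.2
  by_cases hN : N ≤ 0
  · rw [PySem.List.pyRange_neg_one_eq_nil hN]
    simp only [List.foldl_nil]
  · have HC : ∀ n : Int, 1 ≤ n → n ≤ N → ∀ v ∈ pvChildren Grev n, 1 ≤ v ∧ v ≤ N := by
      intro n h1 h2 v hv
      obtain ⟨kv, hkv, hk, hvmem⟩ := pvChildren_mem Grev hv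
      have := hPreG kv hkv
      rw [hk] at this
      simp only [h1, h2, decide_true, Bool.and_self, Bool.not_true, Bool.false_or,
        List.all_eq_true] at this
      have := this v hvmem
      simp only [Bool.and_eq_true, decide_eq_true_eq] at this
      exact this
    have hlen : (((List.replicate (N + 1).toNat false : List Bool).length : Int)) = N + 1 := by
      simp; omega
    rw [pvFold Grev N HC _ (fun s hs => by
        rw [PySem.List.mem_pyRange_neg_one] at hs; omega) _ hlen]
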